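-- pv_equiv track=rewrite | github.com/ailabteam/CodesignalPython | isMAC48Address2.py | isMAC48Address
-- ===== SOURCE A (Python) =====
-- def isMAC48Address(s):
--     for i in range(len(s)):
--         if i % 3 == 2:
--             if s[i] != '-':
--                 return False
--         else:
--             sym = s[i]
--             if not ('0' <= sym <= '9' or  'A' <= sym <= 'F'):
--                 return False
--     return len(s) ==  17
-- ===== SOURCE B (Python) =====
-- def isMAC48Address(s):
--     parts = s.split('-')
--     if len(parts) != 6:
--         return False
--     for p in parts:
--         if len(p) != 2:
--             return False
--         for c in p:
--             if not ('0' <= c <= '9' or 'A' <= c <= 'F'):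
--                 return False
--     return True
-- ===== Notes on version B (the rewrite author's own statement) =====
-- stated objective: alternative
-- what changed: Replaces A's single positional index sweep (branching on i % 3) with splitting on the dash separator followed by shape validation of the six groups (each exactly 2 uppercase-hex chars).
import Mathlib
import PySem

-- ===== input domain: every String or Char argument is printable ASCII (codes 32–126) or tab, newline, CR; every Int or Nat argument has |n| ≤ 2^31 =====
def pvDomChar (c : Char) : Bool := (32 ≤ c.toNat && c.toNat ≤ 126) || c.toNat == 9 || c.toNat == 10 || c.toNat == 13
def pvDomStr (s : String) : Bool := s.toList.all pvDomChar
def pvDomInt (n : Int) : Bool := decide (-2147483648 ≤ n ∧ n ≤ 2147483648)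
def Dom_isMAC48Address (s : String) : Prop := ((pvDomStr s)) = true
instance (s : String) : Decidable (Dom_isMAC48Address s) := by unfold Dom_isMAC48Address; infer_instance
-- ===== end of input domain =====

-- B replaces A's positional index sweep with a split on the dash separator then validation of the six groups; same values, alternative decomposition.

-- the character test '0' <= c <= '9' or 'A' <= c <= 'F', identical in both Pythons
def pvHex (c : Char) : Bool := ('0' ≤ c && c ≤ '9') || ('A' ≤ c && c ≤ 'F')

-- ===== PORT A =====
-- the for-loop over range(len(s)): the remaining characters are consumed in order, i is the running index
def pvALoop : List Char → Nat → Nat → Bool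
  | [], _, n => n == 17
  | c :: rest, i, n =>
      if i % 3 == 2 then
        if c != '-' then false else pvALoop rest (i + 1) n
      else
        if !(pvHex c) then false else pvALoop rest (i + 1) n

def isMAC48Address (s : String) : Bool :=
  pvALoop s.toList 0 s.toList.length

-- ===== PORT B =====
-- the inner 'for p in parts' body: len(p) == 2 and every character hex
def pvOk2 (p : List Char) : Bool := p.length == 2 && p.all pvHex

def isMAC48Address_alt (s : String) : Bool :=
  let parts := PySem.Chars.splitOn s.toList ['-']
  if parts.length != 6 then false
  else parts.all pvOk2

-- ===== PRECONDITION & SPEC =====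
def Spec_isMAC48Address (s : String) (out : Bool) : Prop := out = isMAC48Address_alt s
instance (s : String) (out : Bool) : Decidable (Spec_isMAC48Address s out) := by unfold Spec_isMAC48Address; infer_instance

-- ===== CLAIM (what is proved, stated in full; the proofs are below) =====
def Claim_equal_isMAC48Address : Prop := ∀ (s : String), Dom_isMAC48Address s → Spec_isMAC48Address s (isMAC48Address s)

-- ===== LEMMAS AND PROOFS =====

-- simple recursive specification of splitting on '-'
def pvSplitDash (pre : List Char) : List Char → List (List Char)
  | [] => [pre]
  | c :: rest => if c = '-' then pre :: pvSplitDash [] rest else pvSplitDash (pre ++ [c]) rest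

-- positional scan part of A (without the final length check)
def pvScan : List Char → Nat → Bool
  | [], _ => true
  | c :: rest, i => (if i % 3 == 2 then c == '-' else pvHex c) && pvScan rest (i + 1)

theorem pvALoop_eq (l : List Char) : ∀ (i n : Nat),
    pvALoop l i n = (pvScan l i && (n == 17)) := by
  induction l with
  | nil => intro i n; simp [pvALoop, pvScan]
  | cons c rest ih =>
    intro i n
    cases hx : pvHex c <;> by_cases h : i % 3 == 2 <;> by_cases h2 : c = '-' <;>
      simp [pvALoop, pvScan, h, h2, hx, ih, Bool.and_assoc]

theorem go_nil (fuel : Nat) (cur : List Char) (acc : List (List Char)) :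
    PySem.Chars.splitOn.go ['-'] fuel [] cur acc = (cur.reverse :: acc).reverse := by
  cases fuel with
  | zero => rw [PySem.Chars.splitOn.go.eq_def]; simp
  | succ f => rw [PySem.Chars.splitOn.go.eq_def]

theorem go_cons (fuel : Nat) (c : Char) (rest cur : List Char) (acc : List (List Char)) :
    PySem.Chars.splitOn.go ['-'] (fuel + 1) (c :: rest) cur acc =
      if c = '-' then PySem.Chars.splitOn.go ['-'] fuel rest [] (cur.reverse :: acc)
      else PySem.Chars.splitOn.go ['-'] fuel rest (c :: cur) acc := by
  rw [PySem.Chars.splitOn.go.eq_def]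
  by_cases h : c = '-'
  · simp [h, List.isPrefixOf]
  · simp [List.isPrefixOf, h, Ne.symm h]

theorem go_eq_splitDash (l : List Char) : ∀ (fuel : Nat), l.length ≤ fuel →
    ∀ (cur : List Char) (acc : List (List Char)),
      PySem.Chars.splitOn.go ['-'] fuel l cur acc = acc.reverse ++ pvSplitDash cur.reverse l := by
  induction l with
  | nil => intro fuel _ cur acc; simp [go_nil, pvSplitDash]
  | cons c rest ih =>
    intro fuel hf cur acc
    cases fuel with
    | zero => simp at hf
    | succ f =>
      have hf' : rest.length ≤ f := by simpa using hf
      rw [go_cons]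
      by_cases h : c = '-'
      · simp [h, pvSplitDash, ih f hf']
      · simp [h, pvSplitDash, ih f hf']

theorem splitOn_eq_splitDash (l : List Char) :
    PySem.Chars.splitOn l ['-'] = pvSplitDash [] l := by
  simpa using go_eq_splitDash l (l.length + 1) (by omega) [] []

-- the first piece of pvSplitDash pre l extends pre
theorem splitDash_head (l : List Char) : ∀ (pre : List Char),
    ∃ t rest, pvSplitDash pre l = (pre ++ t) :: rest := by
  induction l with
  | nil => intro pre; exact ⟨[], [], by simp [pvSplitDash]⟩
  | cons c r ih =>
    intro pre
    by_cases h : c = '-'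
    · exact ⟨[], pvSplitDash [] r, by simp [pvSplitDash, h]⟩
    · obtain ⟨t, rest, ht⟩ := ih (pre ++ [c])
      exact ⟨c :: t, rest, by simp [pvSplitDash, h, ht]⟩

theorem hex_dash : pvHex '-' = false := by decide

theorem pvScan_add_three (m : List Char) : ∀ (i : Nat), pvScan m (i + 3) = pvScan m i := by
  induction m with
  | nil => intro i; simp [pvScan]
  | cons x xs ihm =>
    intro i
    have hmod : (i + 3) % 3 = i % 3 := Nat.add_mod_right i 3
    simp only [pvScan, hmod]
    rw [show i + 3 + 1 = (i + 1) + 3 by ring, ihm (i + 1)]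

-- the heart: A's positional scan + length test equals B's group test, group count generalized
theorem main_lemma : ∀ (k : Nat) (l : List Char),
    (pvScan l 0 && (l.length == 3 * k + 2)) =
      (((pvSplitDash [] l).length == k + 1) && (pvSplitDash [] l).all pvOk2) := by
  intro k
  induction k with
  | zero =>
    intro l
    match l with
    | [] => simp [pvScan, pvSplitDash, pvOk2]
    | [a] =>
      by_cases h : a = '-' <;>
        simp [pvScan, pvSplitDash, pvOk2, h]
    | a :: b :: rest =>
      by_cases ha : a = '-'
      · subst ha; simp [pvScan, pvSplitDash, pvOk2, hex_dash]
      · by_cases hb : b = '-'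
        · subst hb
          obtain ⟨t, r, ht⟩ := splitDash_head rest ([] : List Char)
          simp [pvScan, pvSplitDash, pvOk2, ha, hex_dash, ht]
        · match rest with
          | [] => simp [pvScan, pvSplitDash, pvOk2, ha, hb]
          | c :: rest2 =>
            by_cases hc : c = '-'
            · obtain ⟨t, r, ht⟩ := splitDash_head rest2 ([] : List Char)
              simp [pvScan, pvSplitDash, pvOk2, ha, hb, hc, ht]
            · obtain ⟨t, r, ht⟩ := splitDash_head rest2 ([a, b, c] : List Char)
              have hsc : pvScan (a :: b :: c :: rest2) 0 = false := by
                simp [pvScan, hc]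
              simp [pvSplitDash, ha, hb, hc, hsc, ht, pvOk2]
  | succ k ih =>
    intro l
    match l with
    | [] => simp [pvScan, pvSplitDash, pvOk2]
    | [a] =>
      by_cases h : a = '-' <;>
        simp [pvScan, pvSplitDash, pvOk2, h]
    | a :: b :: rest =>
      by_cases ha : a = '-'
      · subst ha; simp [pvScan, pvSplitDash, pvOk2, hex_dash]
      · by_cases hb : b = '-'
        · subst hb
          obtain ⟨t, r, ht⟩ := splitDash_head rest ([] : List Char)
          simp [pvScan, pvSplitDash, pvOk2, ha, hex_dash, ht]
        · match rest with
          | [] => simp [pvScan, pvSplitDash, pvOk2, ha, hb]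
          | c :: rest2 =>
            by_cases hc : c = '-'
            · subst hc
              have h1 : pvSplitDash [] (a :: b :: '-' :: rest2) = [a, b] :: pvSplitDash [] rest2 := by
                simp [pvSplitDash, ha, hb]
              have h2 : pvScan (a :: b :: '-' :: rest2) 0 =
                  (pvHex a && (pvHex b && pvScan rest2 0)) := by
                simp [pvScan, pvScan_add_three rest2 0]
              rw [h1, h2]
              have e3 : pvOk2 [a, b] = (pvHex a && pvHex b) := by simp [pvOk2]
              simp only [List.length_cons, List.all_cons, e3]
              have ihr := ih rest2
              rw [Bool.eq_iff_iff] at ihr ⊢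
              simp only [Bool.and_eq_true, beq_iff_eq] at ihr ⊢
              constructor
              · rintro ⟨⟨hha, hhb, hsc⟩, hlen⟩
                obtain ⟨hl2, hall⟩ := ihr.mp ⟨hsc, by omega⟩
                exact ⟨by omega, ⟨hha, hhb⟩, hall⟩
              · rintro ⟨hlen, ⟨hha, hhb⟩, hall⟩
                obtain ⟨hsc, hl2⟩ := ihr.mpr ⟨by omega, hall⟩
                exact ⟨⟨hha, hhb, hsc⟩, by omega⟩
            · obtain ⟨t, r, ht⟩ := splitDash_head rest2 ([a, b, c] : List Char)
              have hsc : pvScan (a :: b :: c :: rest2) 0 = false := by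
                simp [pvScan, hc]
              simp [pvSplitDash, ha, hb, hc, hsc, ht, pvOk2]

-- ===== VERDICT (by name: the statement is the Claim_ definition above) =====
theorem isMAC48Address_spec : Claim_equal_isMAC48Address := by
  intro s _
  unfold Spec_isMAC48Address isMAC48Address isMAC48Address_alt
  rw [pvALoop_eq, splitOn_eq_splitDash,
    show (17 : Nat) = 3 * 5 + 2 by norm_num, main_lemma 5 s.toList]
  by_cases h : (pvSplitDash [] s.toList).length = 6
  · simp [h]
  · simp [h]
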